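-- pv_equiv track=rewrite | github.com/Seifert69/DikuMUD3 | vme/zone/ascii_renderer.py | _format_grid_output
-- ===== SOURCE A (Python) =====
-- from typing import List, Tuple, Set, Dict
--
-- def _format_grid_output(grid: List[List[str]], collision_occurred: bool = False) -> str:
--     """Format grid for display"""
--     # Trim empty rows/columns
--     min_row = len(grid)
--     max_row = -1
--     min_col = len(grid[0]) if grid else 0
--     max_col = -1
--
--     for y, row in enumerate(grid):
--         for x, char in enumerate(row):
--             if char != ' ':
--                 min_row = min(min_row, y)
--                 max_row = max(max_row, y)
--                 min_col = min(min_col, x)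
--                 max_col = max(max_col, x)
--
--     if min_row > max_row:
--         return "Empty map"
--
--     # Extract and format the relevant portion
--     result = []
--
--     for y in range(min_row, max_row + 1):
--         row_str = ""
--         for x in range(min_col, max_col + 1):
--             row_str += grid[y][x]
--         result.append(f"     {row_str}")
--
--     if collision_occurred:
--         result.append("")
--         result.append("!! - Collision detected, rendering stopped")
--
--     return '\n'.join(result)
-- ===== SOURCE B (Python) =====
-- def _format_grid_output(grid, collision_occurred=False):
--     """Format grid for display (edge-peeling trim instead of bounding-box min/max sweep)."""
--     def blank(row):
--         return all(c == ' ' for c in row)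
--
--     top = 0
--     while top < len(grid) and blank(grid[top]):
--         top += 1
--     if top == len(grid):
--         return "Empty map"
--     bottom = len(grid)
--     while blank(grid[bottom - 1]):
--         bottom -= 1
--     rows = grid[top:bottom]
--
--     width = max(len(r) for r in rows)
--     colhas = [any(x < len(r) and r[x] != ' ' for r in rows) for x in range(width)]
--     left = 0
--     while not colhas[left]:
--         left += 1
--     right = width
--     while not colhas[right - 1]:
--         right -= 1
--
--     lines = ["     " + "".join(r[x] if x < len(r) else ' ' for x in range(left, right))
--              for r in rows]
--     if collision_occurred:
--         lines.append("")
--         lines.append("!! - Collision detected, rendering stopped")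
--     return '\n'.join(lines)
-- ===== Notes on version B (the rewrite author's own statement) =====
-- stated objective: alternative
-- what changed: A's single sweep over every cell maintaining a running four-component (min_row,max_row,min_col,max_col) bounding box is replaced by an edge-peeling trim: while-loops peel blank rows off the top and bottom, then a per-column content-flag list is peeled from the left and right, and lines are built from the trimmed row slice with ragged rows padded.
-- intended difference: On grids that contain a non-space cell but whose first row is shorter than every non-space column index, A's min_col keeps its initial value len(grid[0]) and A emits extra all-space leading columns (e.g. ' x'), while B emits the properly trimmed box (' x'), which is the intended trim-empty-columns behaviour. — e.g. on _format_grid_output([[" "], [" ", " ", "x"]], false): A returns " x", B returns " x"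
import Mathlib
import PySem

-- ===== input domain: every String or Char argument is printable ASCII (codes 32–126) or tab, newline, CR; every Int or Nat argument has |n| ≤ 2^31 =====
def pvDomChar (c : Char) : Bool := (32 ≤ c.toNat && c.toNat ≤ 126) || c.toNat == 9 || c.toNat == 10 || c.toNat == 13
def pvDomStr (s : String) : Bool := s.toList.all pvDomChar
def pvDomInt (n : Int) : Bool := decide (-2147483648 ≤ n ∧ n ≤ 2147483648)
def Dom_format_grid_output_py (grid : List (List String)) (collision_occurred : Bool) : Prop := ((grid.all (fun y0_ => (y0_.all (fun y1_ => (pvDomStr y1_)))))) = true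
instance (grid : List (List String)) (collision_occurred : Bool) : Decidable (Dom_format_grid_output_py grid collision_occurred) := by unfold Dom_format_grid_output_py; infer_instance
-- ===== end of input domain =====

-- B replaces A's single four-way min/max bounding-box sweep by an edge-peeling trim: while-loops
-- peel blank rows off the top and bottom, a per-column content-flag list is peeled from the left
-- and right, and lines are built from the trimmed row slice (objective: alternative algorithm).
-- A raises IndexError on grids where a row inside the content row range is shorter than the
-- bounding box; Pre_ excludes exactly those inputs.


-- ===== PORT A =====
-- literal transliteration of A: one pass over every cell maintaining (min_row, max_row, min_col, max_col),
-- then extraction of the box by string accumulation.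
-- A-side helper: len(grid[0]) if grid else 0
def pvC0 (grid : List (List String)) : Int :=
  match grid with | [] => 0 | r :: _ => (r.length : Int)

def format_grid_output_py (grid : List (List String)) (collision_occurred : Bool) : String :=
  let init : Int × Int × Int × Int :=
    ((grid.length : Int), -1, pvC0 grid, -1)
  let st := (PySem.List.enumerate grid 0).foldl
    (fun st p =>
      (PySem.List.enumerate p.2 0).foldl
        (fun st q =>
          if q.2 ≠ " " then (min st.1 p.1, max st.2.1 p.1, min st.2.2.1 q.1, max st.2.2.2 q.1)
          else st) st) init
  if st.1 > st.2.1 then "Empty map"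
  else
    let result := (PySem.List.pyRange st.1 (st.2.1 + 1) 1).map (fun y =>
      "     " ++ (PySem.List.pyRange st.2.2.1 (st.2.2.2 + 1) 1).foldl
        (fun row_str x => row_str ++ PySem.List.pyGetD (PySem.List.pyGetD grid y []) x "") "")
    let result := if collision_occurred then result ++ ["", "!! - Collision detected, rendering stopped"]
                  else result
    PySem.Str.join "\n" result

-- ===== PORT B =====
-- literal transliteration of B (Source B): edge-peeling trim — while-loops peel blank rows off the
-- top and bottom, a per-column content-flag list is peeled from the left and right, and lines
-- are built from the trimmed row slice with ragged rows padded.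

-- blank(row) = all(c == ' ' for c in row)
def pvBlank (row : List String) : Bool := row.all (fun c => c == " ")

-- while top < len(grid) and blank(grid[top]): top += 1   (structural recursion on the number of
-- remaining rows, which only makes the loop total; the loop body is unchanged)
def pvPeelTopGo (grid : List (List String)) : Nat → Nat → Nat
  | 0, top => top
  | fuel + 1, top =>
    if h : top < grid.length then
      if pvBlank grid[top] then pvPeelTopGo grid fuel (top + 1) else top
    else top

def pvPeelTop (grid : List (List String)) (top : Nat) : Nat :=
  pvPeelTopGo grid (grid.length - top) top

-- while blank(grid[bottom - 1]): bottom -= 1   (structural recursion on bottom, which only makes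
-- the loop total; it never bottoms out on reachable states, where a non-blank row stops the loop)
def pvPeelBottom (grid : List (List String)) : Nat → Nat
  | 0 => 0
  | b + 1 => if pvBlank (grid.getD b []) then pvPeelBottom grid b else b + 1

-- while not colhas[left]: left += 1   (structural recursion on the number of remaining flags,
-- which only makes the loop total; a true flag stops it first)
def pvPeelLeftGo (colhas : List Bool) : Nat → Nat → Nat
  | 0, left => left
  | fuel + 1, left =>
    if h : left < colhas.length then
      if colhas[left] then left else pvPeelLeftGo colhas fuel (left + 1)
    else left

def pvPeelLeft (colhas : List Bool) (left : Nat) : Nat :=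
  pvPeelLeftGo colhas (colhas.length - left) left

-- while not colhas[right - 1]: right -= 1   (structural recursion on right, which only makes the
-- loop total; a true flag stops it first)
def pvPeelRight (colhas : List Bool) : Nat → Nat
  | 0 => 0
  | r + 1 => if colhas.getD r false then r + 1 else pvPeelRight colhas r

def format_grid_output_py_alt (grid : List (List String)) (collision_occurred : Bool) : String :=
  let top := pvPeelTop grid 0
  if top = grid.length then "Empty map"
  else
    let bottom := pvPeelBottom grid grid.length
    let rows := PySem.List.slice grid (some (top : Int)) (some (bottom : Int))
    let width := ((PySem.List.max? (rows.map List.length) (fun v => v)).getD 0)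
    let colhas := (List.range width).map (fun x =>
      rows.any (fun r => decide (x < r.length) && decide (PySem.List.pyGetD r (x : Int) "" ≠ " ")))
    let left := pvPeelLeft colhas 0
    let right := pvPeelRight colhas width
    let lines := rows.map (fun r =>
      "     " ++ PySem.Str.join "" ((PySem.List.pyRange (left : Int) (right : Int) 1).map
        (fun x => if x < (r.length : Int) then PySem.List.pyGetD r x " " else " ")))
    let lines := if collision_occurred then lines ++ ["", "!! - Collision detected, rendering stopped"]
                 else lines
    PySem.Str.join "\n" lines

-- ===== PRECONDITION & SPEC =====
-- Pre_ excludes exactly the grids on which A raises IndexError: those where some row lying between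
-- two content rows (inclusive) is shorter than max_col + 1, max_col being the largest non-space
-- column index anywhere in the grid.
def Pre_format_grid_output_py (grid : List (List String)) (collision_occurred : Bool) : Prop :=
  ∀ p ∈ PySem.List.enumerate grid 0,
    ((∃ p1 ∈ PySem.List.enumerate grid 0, p1.1 ≤ p.1 ∧ p1.2.any (fun c => c ≠ " ")) ∧
     (∃ p2 ∈ PySem.List.enumerate grid 0, p.1 ≤ p2.1 ∧ p2.2.any (fun c => c ≠ " "))) →
    ∀ q ∈ PySem.List.enumerate grid 0, ∀ r ∈ PySem.List.enumerate q.2 0,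
      r.2 ≠ " " → r.1 < (p.2.length : Int)

instance (grid : List (List String)) (collision_occurred : Bool) :
    Decidable (Pre_format_grid_output_py grid collision_occurred) := by
  unfold Pre_format_grid_output_py; infer_instance

def pvWitness_format_grid_output_py : List (List String) × Bool := ([[" ", "x"], ["y", " "]], true)

-- On grids whose first row is shorter than every non-space column index (and which do contain a
-- non-space cell), A's min_col keeps its initial value len(grid[0]) and A wrongly emits the
-- all-space columns from len(grid[0]) up to the true leftmost content column, while B emits the
-- properly trimmed box, which is the intended "trim empty columns" behaviour.
def D_format_grid_output_py (grid : List (List String)) (collision_occurred : Bool) : Prop :=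
  grid ≠ [] ∧
  grid.any (fun row => row.any (fun c => c ≠ " ")) = true ∧
  grid.all (fun q => (q.take ((grid.headD []).length + 1)).all (fun c => c == " ")) = true

instance (grid : List (List String)) (collision_occurred : Bool) :
    Decidable (D_format_grid_output_py grid collision_occurred) := by
  unfold D_format_grid_output_py; infer_instance

def Spec_format_grid_output_py (grid : List (List String)) (collision_occurred : Bool) (out : String) : Prop :=
  ¬ D_format_grid_output_py grid collision_occurred → out = format_grid_output_py_alt grid collision_occurred

instance (grid : List (List String)) (collision_occurred : Bool) (out : String) :
    Decidable (Spec_format_grid_output_py grid collision_occurred out) := by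
  unfold Spec_format_grid_output_py; infer_instance

def pvDiffWitness_format_grid_output_py : List (List String) × Bool := ([[" "], [" ", " ", "x"]], false)
def pvDiffWitnessOut_format_grid_output_py : String × String := ("      x", "     x")

-- ===== CLAIM (what is proved, stated in full; the proofs are below) =====
def Claim_unchanged_format_grid_output_py : Prop := ∀ (grid : List (List String)) (collision_occurred : Bool), Dom_format_grid_output_py grid collision_occurred → Pre_format_grid_output_py grid collision_occurred → Spec_format_grid_output_py grid collision_occurred (format_grid_output_py grid collision_occurred)
def Claim_changed_format_grid_output_py : Prop := Dom_format_grid_output_py (pvDiffWitness_format_grid_output_py.1) (pvDiffWitness_format_grid_output_py.2) ∧ Pre_format_grid_output_py (pvDiffWitness_format_grid_output_py.1) (pvDiffWitness_format_grid_output_py.2) ∧ D_format_grid_output_py (pvDiffWitness_format_grid_output_py.1) (pvDiffWitness_format_grid_output_py.2) ∧ format_grid_output_py (pvDiffWitness_format_grid_output_py.1) (pvDiffWitness_format_grid_output_py.2) = pvDiffWitnessOut_format_grid_output_py.1 ∧ format_grid_output_py_alt (pvDiffWitness_format_grid_output_py.1) (pvDiffWitness_format_grid_output_py.2) = pvDiffWitnessOut_format_grid_output_py.2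 ∧ pvDiffWitnessOut_format_grid_output_py.1 ≠ pvDiffWitnessOut_format_grid_output_py.2

def Claim_exact_format_grid_output_py : Prop := ∀ (grid : List (List String)) (collision_occurred : Bool), Dom_format_grid_output_py grid collision_occurred → Pre_format_grid_output_py grid collision_occurred → D_format_grid_output_py grid collision_occurred → format_grid_output_py grid collision_occurred ≠ format_grid_output_py_alt grid collision_occurred

-- ===== LEMMAS AND PROOFS =====

-- D_ unpacked: a non-space cell exists and every non-space cell sits strictly right of column
-- len(grid[0])
theorem pvD_iff (grid : List (List String)) (coll : Bool) :
    D_format_grid_output_py grid coll ↔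
      (grid ≠ [] ∧ (∃ row ∈ grid, ∃ c ∈ row, c ≠ " ") ∧
       ∀ q ∈ grid, ∀ r ∈ PySem.List.enumerate q 0, r.2 ≠ " " →
         ((grid.headD []).length : Int) < r.1) := by
  unfold D_format_grid_output_py
  constructor
  · rintro ⟨h1, h2, h3⟩
    refine ⟨h1, ?_, ?_⟩
    · rcases List.any_eq_true.1 h2 with ⟨row, hrow, hany⟩
      rcases List.any_eq_true.1 hany with ⟨c, hc, hne⟩
      exact ⟨row, hrow, c, hc, by simpa using hne⟩
    · intro q hq r hr hne
      rcases (PySem.List.mem_enumerate_iff q 0 r).1 hr with ⟨k, hk, rfl⟩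
      simp only [zero_add]
      by_contra hle
      push_neg at hle
      have hkle : k < (grid.headD []).length + 1 := by omega
      have hmem : q[k] ∈ q.take ((grid.headD []).length + 1) := by
        rw [List.mem_iff_getElem]
        exact ⟨k, by rw [List.length_take]; omega, by rw [List.getElem_take]⟩
      have := List.all_eq_true.1 (List.all_eq_true.1 h3 q hq) _ hmem
      simp only [beq_iff_eq] at this
      exact hne this
  · rintro ⟨h1, h2, h3⟩
    refine ⟨h1, ?_, ?_⟩
    · rcases h2 with ⟨row, hrow, c, hc, hne⟩
      exact List.any_eq_true.2 ⟨row, hrow, List.any_eq_true.2 ⟨c, hc, by simpa using hne⟩⟩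
    · rw [List.all_eq_true]
      intro q hq
      rw [List.all_eq_true]
      intro c hc
      rcases List.mem_iff_getElem.1 hc with ⟨k, hk, rfl⟩
      have hklen : k < q.length := by
        have h2' := hk
        rw [List.length_take] at h2'
        omega
      rw [List.getElem_take]
      simp only [beq_iff_eq]
      by_contra hne
      have hpair : ((0 : Int) + k, q[k]) ∈ PySem.List.enumerate q 0 :=
        (PySem.List.mem_enumerate_iff q 0 _).2 ⟨k, hklen, rfl⟩
      have := h3 q hq _ hpair hne
      simp only [zero_add] at this
      have hkb : k < (grid.headD []).length + 1 := by
        rw [List.length_take] at hk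
        omega
      omega

-- the per-cell state update of A's sweep
def pvStep (y : Int) (st : Int × Int × Int × Int) (i : Int) : Int × Int × Int × Int :=
  (min st.1 y, max st.2.1 y, min st.2.2.1 i, max st.2.2.2 i)

-- indices (from offset k) of the elements satisfying f
def pvMarks {α : Type} (f : α → Prop) [DecidablePred f] (k : Int) (l : List α) : List Int :=
  (PySem.List.enumerate l k).filterMap (fun p => if f p.2 then some p.1 else none)

theorem pvMarks_nil {α : Type} (f : α → Prop) [DecidablePred f] (k : Int) :
    pvMarks f k ([] : List α) = [] := rfl

theorem pvMarks_cons {α : Type} (f : α → Prop) [DecidablePred f] (k : Int) (x : α) (l : List α) :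
    pvMarks f k (x :: l) = (if f x then [k] else []) ++ pvMarks f (k + 1) l := by
  by_cases hx : f x <;> simp [pvMarks, PySem.List.enumerate_cons, hx]

theorem pvMarks_le {α : Type} (f : α → Prop) [DecidablePred f] :
    ∀ (l : List α) (k : Int), ∀ i ∈ pvMarks f k l, k ≤ i ∧ i < k + l.length := by
  intro l
  induction l with
  | nil => intro k i hi; simp [pvMarks_nil] at hi
  | cons x t ih =>
    intro k i hi
    rw [pvMarks_cons] at hi
    rcases List.mem_append.1 hi with h | h
    · split at h <;> simp at h
      subst h
      simp only [List.length_cons]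
      constructor
      · omega
      · push_cast; omega
    · have := ih (k + 1) i h
      simp only [List.length_cons]
      constructor <;> omega

theorem pvMarks_eq_nil_iff {α : Type} (f : α → Prop) [DecidablePred f] :
    ∀ (l : List α) (k : Int), pvMarks f k l = [] ↔ ∀ x ∈ l, ¬ f x := by
  intro l
  induction l with
  | nil => intro k; simp [pvMarks_nil]
  | cons x t ih =>
    intro k
    rw [pvMarks_cons]
    constructor
    · intro h
      rcases List.append_eq_nil_iff.1 h with ⟨h1, h2⟩
      intro y hy
      rcases List.mem_cons.1 hy with rfl | hy
      · intro hf; simp [hf] at h1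
      · exact (ih (k + 1)).1 h2 y hy
    · intro h
      have hx : ¬ f x := h x (by simp)
      simp [hx, (ih (k + 1)).2 (fun y hy => h y (by simp [hy]))]

theorem pvMarks_head_min {α : Type} (f : α → Prop) [DecidablePred f] :
    ∀ (l : List α) (k : Int) (h : Int), (pvMarks f k l).head? = some h →
      ∀ i ∈ pvMarks f k l, h ≤ i := by
  intro l
  induction l with
  | nil => intro k h hh; simp [pvMarks_nil] at hh
  | cons x t ih =>
    intro k h hh i hi
    rw [pvMarks_cons] at hh hi
    by_cases hx : f x
    · simp [hx] at hh hi
      rcases hi with rfl | hi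
      · omega
      · have := pvMarks_le f t (k + 1) i hi
        omega
    · simp [hx] at hh hi
      exact ih (k + 1) h hh i hi

theorem pvMarks_mem_iff {α : Type} (f : α → Prop) [DecidablePred f] :
    ∀ (l : List α) (k : Int) (i : Int),
      i ∈ pvMarks f k l ↔ ∃ p ∈ PySem.List.enumerate l k, f p.2 ∧ p.1 = i := by
  intro l
  induction l with
  | nil => intro k i; simp [pvMarks_nil, PySem.List.enumerate_nil]
  | cons x t ih =>
    intro k i
    rw [pvMarks_cons]
    by_cases hx : f x <;>
      simp only [hx, if_pos, if_neg, not_false_iff, List.singleton_append, List.nil_append,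
        PySem.List.enumerate_cons, List.mem_cons, ih (k + 1) i]
    · constructor
      · rintro (rfl | ⟨p, hp, hf, rfl⟩)
        · exact ⟨(i, x), Or.inl rfl, hx, rfl⟩
        · exact ⟨p, Or.inr hp, hf, rfl⟩
      · rintro ⟨p, rfl | hp, hf, rfl⟩
        · exact Or.inl rfl
        · exact Or.inr ⟨p, hp, hf, rfl⟩
    · constructor
      · rintro ⟨p, hp, hf, rfl⟩
        exact ⟨p, Or.inr hp, hf, rfl⟩
      · rintro ⟨p, rfl | hp, hf, rfl⟩
        · exact absurd hf hx
        · exact ⟨p, hp, hf, rfl⟩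

theorem pvGetLast?_cons {α : Type} (a : α) (l : List α) (h : l ≠ []) :
    (a :: l).getLast? = l.getLast? := by
  cases l with
  | nil => exact absurd rfl h
  | cons b t => simp [List.getLast?_cons_cons]

-- fold of min over a marks list keeps only the head
theorem pvMarks_foldl_min {α : Type} (f : α → Prop) [DecidablePred f] :
    ∀ (l : List α) (k a : Int),
      (pvMarks f k l).foldl min a =
        (match (pvMarks f k l).head? with | none => a | some h => min a h) := by
  intro l
  induction l with
  | nil => intro k a; simp [pvMarks_nil]
  | cons x t ih =>
    intro k a
    rw [pvMarks_cons]
    by_cases hx : f x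
    · simp only [hx, if_pos, List.singleton_append, List.foldl_cons, List.head?_cons]
      rw [ih (k + 1) (min a k)]
      cases hh : (pvMarks f (k + 1) t).head? with
      | none => rfl
      | some h =>
        have := pvMarks_le f t (k + 1) h (List.mem_of_mem_head? hh)
        simp only
        exact min_eq_left (le_trans (min_le_right a k) (by omega : k ≤ h))
    · simp only [hx, if_neg, not_false_iff, List.nil_append]
      exact ih (k + 1) a

-- fold of max over a marks list keeps only the last element
theorem pvMarks_foldl_max {α : Type} (f : α → Prop) [DecidablePred f] :
    ∀ (l : List α) (k a : Int),
      (pvMarks f k l).foldl max a =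
        (match (pvMarks f k l).getLast? with | none => a | some j => max a j) := by
  intro l
  induction l with
  | nil => intro k a; simp [pvMarks_nil]
  | cons x t ih =>
    intro k a
    rw [pvMarks_cons]
    by_cases hx : f x
    · simp only [hx, if_pos, List.singleton_append, List.foldl_cons]
      rw [ih (k + 1) (max a k)]
      cases hh : (pvMarks f (k + 1) t).getLast? with
      | none =>
        have hnil : pvMarks f (k + 1) t = [] := by
          cases h : pvMarks f (k + 1) t with
          | nil => rfl
          | cons z zs =>
            rw [h] at hh
            exact absurd hh (by simp [List.getLast?_eq_getLast])
        rw [hnil]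
        simp
      | some j =>
        have hne : pvMarks f (k + 1) t ≠ [] := by
          intro h; rw [h] at hh; simp at hh
        have hj : j ∈ pvMarks f (k + 1) t := List.mem_of_getLast? hh
        have := pvMarks_le f t (k + 1) j hj
        rw [pvGetLast?_cons _ _ hne, hh]
        simp only
        rw [max_assoc]
        congr 1
        exact max_eq_right (by omega)
    · simp only [hx, if_neg, not_false_iff, List.nil_append]
      exact ih (k + 1) a

-- first non-space index of each row that has one, resp. last
def pvFirsts (grid : List (List String)) : List Int :=
  grid.filterMap (fun row => (pvMarks (fun c => c ≠ " ") 0 row).head?)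

def pvLasts (grid : List (List String)) : List Int :=
  grid.filterMap (fun row => (pvMarks (fun c => c ≠ " ") 0 row).getLast?)

-- folding A's per-cell update over a list of column indices, componentwise
theorem pvFoldStep (y : Int) :
    ∀ (l : List Int) (st : Int × Int × Int × Int), l ≠ [] →
      l.foldl (pvStep y) st =
        (min st.1 y, max st.2.1 y, l.foldl min st.2.2.1, l.foldl max st.2.2.2) := by
  intro l
  induction l with
  | nil => intro st h; exact absurd rfl h
  | cons i t ih =>
    intro st _
    cases t with
    | nil => rfl
    | cons j u =>
      rw [List.foldl_cons, ih (pvStep y st i) (by simp)]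
      simp only [pvStep, List.foldl_cons]
      refine Prod.ext ?_ (Prod.ext ?_ rfl) <;> simp only
      · rw [min_assoc, min_self]
      · rw [max_assoc, max_self]

-- A's inner loop is the fold of pvStep over the non-space indices of the row
theorem pvInner (row : List String) (y : Int) (st : Int × Int × Int × Int) :
    (PySem.List.enumerate row 0).foldl
        (fun st q => if q.2 ≠ " " then pvStep y st q.1 else st) st =
      (pvMarks (fun c => c ≠ " ") 0 row).foldl (pvStep y) st := by
  rw [pvMarks, List.foldl_filterMap]
  congr 1
  funext st q
  split <;> rfl

-- A's whole sweep, characterised by content rows and per-row first/last non-space indices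
theorem pvOuter :
    ∀ (grid : List (List String)) (k : Int) (st : Int × Int × Int × Int),
      (PySem.List.enumerate grid k).foldl
          (fun st p =>
            (PySem.List.enumerate p.2 0).foldl
              (fun st q => if q.2 ≠ " " then pvStep p.1 st q.1 else st) st) st =
        ((pvMarks (fun row => ∃ c ∈ row, c ≠ " ") k grid).foldl min st.1,
         (pvMarks (fun row => ∃ c ∈ row, c ≠ " ") k grid).foldl max st.2.1,
         (pvFirsts grid).foldl min st.2.2.1,
         (pvLasts grid).foldl max st.2.2.2) := by
  intro grid
  induction grid with
  | nil => intro k st; simp [pvMarks_nil, pvFirsts, pvLasts, PySem.List.enumerate_nil]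
  | cons row grid ih =>
    intro k st
    rw [PySem.List.enumerate_cons, List.foldl_cons, pvInner, pvMarks_cons]
    by_cases hc : ∃ c ∈ row, c ≠ " "
    · have hne : pvMarks (fun c => c ≠ " ") 0 row ≠ [] := by
        intro h
        rcases hc with ⟨c, hc, hcs⟩
        exact ((pvMarks_eq_nil_iff (fun c => c ≠ " ") row 0).1 h c hc) hcs
      obtain ⟨i, hi⟩ : ∃ i, (pvMarks (fun c => c ≠ " ") 0 row).head? = some i := by
        cases h : pvMarks (fun c => c ≠ " ") 0 row with
        | nil => exact absurd h hne
        | cons z zs => exact ⟨z, rfl⟩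
      obtain ⟨j, hj⟩ : ∃ j, (pvMarks (fun c => c ≠ " ") 0 row).getLast? = some j := by
        cases h : pvMarks (fun c => c ≠ " ") 0 row with
        | nil => exact absurd h hne
        | cons z zs => exact ⟨(z :: zs).getLast (by simp), List.getLast?_eq_some_getLast _⟩
      rw [pvFoldStep k _ st hne, ih (k + 1)]
      have hfirsts : pvFirsts (row :: grid) = i :: pvFirsts grid := by
        simp [pvFirsts, List.filterMap_cons, hi]
      have hlasts : pvLasts (row :: grid) = j :: pvLasts grid := by
        simp [pvLasts, List.filterMap_cons, hj]
      rw [hfirsts, hlasts]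
      simp only [hc, if_pos, List.singleton_append, List.foldl_cons]
      rw [pvMarks_foldl_min (fun c => c ≠ " ") row 0 st.2.2.1, hi,
        pvMarks_foldl_max (fun c => c ≠ " ") row 0 st.2.2.2, hj]
    · have hnil : pvMarks (fun c => c ≠ " ") 0 row = [] := by
        rw [pvMarks_eq_nil_iff]
        intro c hcmem hcs
        exact hc ⟨c, hcmem, hcs⟩
      have hfirsts : pvFirsts (row :: grid) = pvFirsts grid := by
        simp [pvFirsts, List.filterMap_cons, hnil]
      have hlasts : pvLasts (row :: grid) = pvLasts grid := by
        simp [pvLasts, List.filterMap_cons, hnil]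
      rw [hnil, List.foldl_nil, ih (k + 1), hfirsts, hlasts]
      simp [hc]

theorem pvFoldlMinOut : ∀ (l : List Int) (a b : Int), l.foldl min (min a b) = min a (l.foldl min b) := by
  intro l
  induction l with
  | nil => intro a b; rfl
  | cons c t ih =>
    intro a b
    rw [List.foldl_cons, List.foldl_cons, min_assoc, ih]

theorem pvFoldlMaxOut : ∀ (l : List Int) (a b : Int), l.foldl max (max a b) = max a (l.foldl max b) := by
  intro l
  induction l with
  | nil => intro a b; rfl
  | cons c t ih =>
    intro a b
    rw [List.foldl_cons, List.foldl_cons, max_assoc, ih]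

theorem pvFoldlMinLe : ∀ (l : List Int) (a : Int),
    l.foldl min a ≤ a ∧ ∀ y ∈ l, l.foldl min a ≤ y := by
  intro l
  induction l with
  | nil => intro a; simp
  | cons c t ih =>
    intro a
    rw [List.foldl_cons]
    rcases ih (min a c) with ⟨h1, h2⟩
    refine ⟨le_trans h1 (min_le_left a c), ?_⟩
    intro y hy
    rcases List.mem_cons.1 hy with rfl | hy
    · exact le_trans h1 (min_le_right a y)
    · exact h2 y hy

-- fold of min/max lands on an element (or the seed)
theorem pvFoldlMinMem : ∀ (l : List Int) (a : Int), l.foldl min a ∈ a :: l := by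
  intro l
  induction l with
  | nil => intro a; simp
  | cons c t ih =>
    intro a
    rw [List.foldl_cons]
    rcases List.mem_cons.1 (ih (min a c)) with h | h
    · rcases min_choice a c with hm | hm
      · exact List.mem_cons.2 (Or.inl (h.trans hm))
      · simp [h.trans hm]
    · simp [h]

theorem pvFoldlMaxMem : ∀ (l : List Int) (a : Int), l.foldl max a ∈ a :: l := by
  intro l
  induction l with
  | nil => intro a; simp
  | cons c t ih =>
    intro a
    rw [List.foldl_cons]
    rcases List.mem_cons.1 (ih (max a c)) with h | h
    · rcases max_choice a c with hm | hm
      · exact List.mem_cons.2 (Or.inl (h.trans hm))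
      · simp [h.trans hm]
    · simp [h]

-- ''.join over Chars and Str
theorem pvCharsJoinCons (p : List Char) (rest : List (List Char)) :
    PySem.Chars.join [] (p :: rest) = p ++ PySem.Chars.join [] rest := by
  cases rest with
  | nil => simp [PySem.Chars.join_singleton, PySem.Chars.join_nil]
  | cons q r => rw [PySem.Chars.join_cons_cons]; simp

theorem pvStrJoinCons (p : String) (rest : List String) :
    PySem.Str.join "" (p :: rest) = p ++ PySem.Str.join "" rest := by
  apply String.toList_inj.1
  rw [PySem.Str.toList_join, String.toList_append, PySem.Str.toList_join]
  simp only [List.map_cons]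
  exact pvCharsJoinCons p.toList _

-- string accumulation over a list is prefix ++ join
theorem pvJoinFold : ∀ (l : List Int) (f : Int → String) (s0 : String),
    l.foldl (fun s x => s ++ f x) s0 = s0 ++ PySem.Str.join "" (l.map f) := by
  intro l
  induction l with
  | nil =>
    intro f s0
    apply String.toList_inj.1
    rw [List.foldl_nil, String.toList_append, PySem.Str.toList_join]
    simp [PySem.Chars.join_nil]
  | cons x t ih =>
    intro f s0
    rw [List.foldl_cons, ih, List.map_cons, pvStrJoinCons, ← String.append_assoc]

-- the sweep lemma stated in port A's literal shape
theorem pvSweep (grid : List (List String)) (k : Int) (st : Int × Int × Int × Int) :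
    (PySem.List.enumerate grid k).foldl
        (fun st p =>
          (PySem.List.enumerate p.2 0).foldl
            (fun st q =>
              if q.2 ≠ " " then (min st.1 p.1, max st.2.1 p.1, min st.2.2.1 q.1, max st.2.2.2 q.1)
              else st) st) st =
      ((pvMarks (fun row => ∃ c ∈ row, c ≠ " ") k grid).foldl min st.1,
       (pvMarks (fun row => ∃ c ∈ row, c ≠ " ") k grid).foldl max st.2.1,
       (pvFirsts grid).foldl min st.2.2.1,
       (pvLasts grid).foldl max st.2.2.2) :=
  pvOuter grid k st

-- no-content characterisations
theorem pvFirsts_eq_nil_iff (grid : List (List String)) :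
    pvFirsts grid = [] ↔ ∀ row ∈ grid, ∀ c ∈ row, ¬ c ≠ " " := by
  rw [pvFirsts, List.filterMap_eq_nil_iff]
  constructor
  · intro h row hrow c hc hne
    have := h row hrow
    rw [List.head?_eq_none_iff, pvMarks_eq_nil_iff] at this
    exact this c hc hne
  · intro h row hrow
    rw [List.head?_eq_none_iff, pvMarks_eq_nil_iff]
    exact h row hrow

theorem pvLasts_eq_nil_iff (grid : List (List String)) :
    pvLasts grid = [] ↔ ∀ row ∈ grid, ∀ c ∈ row, ¬ c ≠ " " := by
  rw [pvLasts, List.filterMap_eq_nil_iff]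
  constructor
  · intro h row hrow c hc hne
    have := h row hrow
    rw [List.getLast?_eq_none_iff, pvMarks_eq_nil_iff] at this
    exact this c hc hne
  · intro h row hrow
    rw [List.getLast?_eq_none_iff, pvMarks_eq_nil_iff]
    exact h row hrow

theorem pvCR_eq_nil_iff (grid : List (List String)) :
    pvMarks (fun row => ∃ c ∈ row, c ≠ " ") 0 grid = [] ↔ ∀ row ∈ grid, ∀ c ∈ row, ¬ c ≠ " " := by
  rw [pvMarks_eq_nil_iff]
  constructor
  · intro h row hrow c hc hne
    exact h row hrow ⟨c, hc, hne⟩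
  · rintro h row hrow ⟨c, hc, hne⟩
    exact h row hrow c hc hne

-- membership of the snd component of enumerate
theorem pvEnumerate_snd_mem {α : Type} (l : List α) (k : Int) (p : Int × α)
    (hp : p ∈ PySem.List.enumerate l k) : p.2 ∈ l := by
  rcases (PySem.List.mem_enumerate_iff l k p).1 hp with ⟨j, hj, rfl⟩
  exact List.getElem_mem hj

-- a list element gives an enumerate pair
theorem pvEnumerate_mem_of_mem {α : Type} (l : List α) (row : α) (h : row ∈ l) :
    ∃ p ∈ PySem.List.enumerate l 0, p.2 = row := by
  rcases List.mem_iff_getElem.1 h with ⟨k, hk, rfl⟩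
  exact ⟨((0 : Int) + k, l[k]), (PySem.List.mem_enumerate_iff l 0 _).2 ⟨k, hk, rfl⟩, rfl⟩

-- lengths of joins
theorem pvStrJoinEmptyLen : ∀ (l : List String),
    (PySem.Str.join "" l).toList.length = (l.map (fun s => s.toList.length)).sum := by
  intro l
  induction l with
  | nil =>
    rw [PySem.Str.toList_join]
    simp [PySem.Chars.join_nil]
  | cons p t ih =>
    rw [pvStrJoinCons, String.toList_append, List.length_append, ih, List.map_cons, List.sum_cons]

theorem pvStrJoinNLLen : ∀ (l : List String), l ≠ [] →
    (PySem.Str.join "\n" l).toList.length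
      = (l.map (fun s => s.toList.length)).sum + (l.length - 1) := by
  intro l
  induction l with
  | nil => intro h; exact absurd rfl h
  | cons p t ih =>
    intro _
    cases t with
    | nil =>
      have h1 : PySem.Str.join "\n" [p] = p := by
        apply String.toList_inj.1
        rw [PySem.Str.toList_join]
        simp [PySem.Chars.join_singleton]
      rw [h1]; simp
    | cons q u =>
      have h2 : PySem.Str.join "\n" (p :: q :: u) = p ++ "\n" ++ PySem.Str.join "\n" (q :: u) := by
        apply String.toList_inj.1
        rw [PySem.Str.toList_join, String.toList_append, String.toList_append, PySem.Str.toList_join]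
        simp only [List.map_cons]
        rw [PySem.Chars.join_cons_cons]
      rw [h2, String.toList_append, String.toList_append, List.length_append, List.length_append,
        ih (by simp)]
      simp only [List.map_cons, List.sum_cons, List.length_cons]
      have hnl : ("\n" : String).toList.length = 1 := rfl
      omega

-- summing a pointwise-shifted map
theorem pvSumShift : ∀ (yr : List Int) (g1 g2 : Int → Nat) (k : Nat),
    (∀ y ∈ yr, g1 y = g2 y + k) →
    (yr.map g1).sum = (yr.map g2).sum + yr.length * k := by
  intro yr
  induction yr with
  | nil => intro g1 g2 k _; simp
  | cons y t ih =>
    intro g1 g2 k h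
    simp only [List.map_cons, List.sum_cons, List.length_cons]
    rw [ih g1 g2 k (fun z hz => h z (by simp [hz])), h y (by simp)]
    ring

theorem pvSumConstOne : ∀ (l : List Int) (g : Int → Nat),
    (∀ x ∈ l, g x = 1) → (l.map g).sum = l.length := by
  intro l
  induction l with
  | nil => intro g _; rfl
  | cons x t ih =>
    intro g h
    simp only [List.map_cons, List.sum_cons, List.length_cons]
    rw [ih g (fun z hz => h z (by simp [hz])), h x (by simp)]
    omega

-- a row is non-blank exactly when it has a non-space cell
theorem pvBlank_eq_false_iff (row : List String) :
    pvBlank row = false ↔ ∃ c ∈ row, c ≠ " " := by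
  simp [pvBlank, List.all_eq_true]

theorem pvBlank_nil : pvBlank [] = true := rfl

-- specification of the top-peeling loop
theorem pvPeelTopGo_spec (grid : List (List String)) :
    ∀ (fuel t : Nat), grid.length ≤ t + fuel → t ≤ grid.length →
      t ≤ pvPeelTopGo grid fuel t ∧ pvPeelTopGo grid fuel t ≤ grid.length ∧
      (∀ i : Nat, t ≤ i → i < pvPeelTopGo grid fuel t → pvBlank (grid.getD i []) = true) ∧
      (pvPeelTopGo grid fuel t = grid.length ∨ pvBlank (grid.getD (pvPeelTopGo grid fuel t) []) = false) := by
  intro fuel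
  induction fuel with
  | zero =>
    intro t hf ht
    simp only [pvPeelTopGo]
    have heq : t = grid.length := by omega
    exact ⟨le_refl t, by omega, fun i h1 h2 => absurd h2 (by omega), Or.inl heq⟩
  | succ fuel ih =>
    intro t hf ht
    rw [pvPeelTopGo]
    by_cases h : t < grid.length
    · rw [dif_pos h]
      by_cases hb : pvBlank grid[t] = true
      · rw [if_pos hb]
        have hrec := ih (t + 1) (by omega) (by omega)
        refine ⟨by omega, hrec.2.1, ?_, hrec.2.2.2⟩
        intro i hi1 hi2
        rcases Nat.eq_or_lt_of_le hi1 with rfl | hi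
        · rw [List.getD_eq_getElem grid [] h]
          exact hb
        · exact hrec.2.2.1 i (by omega) hi2
      · rw [if_neg hb]
        refine ⟨le_refl t, le_of_lt h, fun i h1 h2 => absurd h2 (by omega), Or.inr ?_⟩
        rw [List.getD_eq_getElem grid [] h]
        exact Bool.eq_false_iff.2 hb
    · rw [dif_neg h]
      have heq : t = grid.length := by omega
      exact ⟨le_refl t, by omega, fun i h1 h2 => absurd h2 (by omega), Or.inl heq⟩

theorem pvPeelTop_spec (grid : List (List String)) :
    ∀ (n t : Nat), grid.length - t = n → t ≤ grid.length →
      t ≤ pvPeelTop grid t ∧ pvPeelTop grid t ≤ grid.length ∧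
      (∀ i : Nat, t ≤ i → i < pvPeelTop grid t → pvBlank (grid.getD i []) = true) ∧
      (pvPeelTop grid t = grid.length ∨ pvBlank (grid.getD (pvPeelTop grid t) []) = false) := by
  intro n t hn ht
  exact pvPeelTopGo_spec grid (grid.length - t) t (by omega) ht

-- specification of the bottom-peeling loop
theorem pvPeelBottom_spec (grid : List (List String)) :
    ∀ (b : Nat), b ≤ grid.length →
      pvPeelBottom grid b ≤ b ∧
      (∀ i : Nat, pvPeelBottom grid b ≤ i → i < b → pvBlank (grid.getD i []) = true) ∧
      (pvPeelBottom grid b = 0 ∨ pvBlank (grid.getD (pvPeelBottom grid b - 1) []) = false) := by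
  intro b
  induction b with
  | zero =>
    intro _
    exact ⟨le_refl 0, fun i h1 h2 => absurd h2 (by omega), Or.inl rfl⟩
  | succ b ih =>
    intro hb
    rw [pvPeelBottom]
    by_cases hbl : pvBlank (grid.getD b []) = true
    · rw [if_pos hbl]
      have hrec := ih (by omega)
      refine ⟨by omega, ?_, hrec.2.2⟩
      intro i hi1 hi2
      rcases Nat.lt_or_ge i b with hi | hi
      · exact hrec.2.1 i hi1 hi
      · have : i = b := by omega
        rw [this]; exact hbl
    · rw [if_neg hbl]
      exact ⟨le_refl _, fun i h1 h2 => absurd h2 (by omega), Or.inr (by simpa using Bool.eq_false_iff.2 hbl)⟩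

-- specification of the left-peeling loop
theorem pvPeelLeftGo_spec (colhas : List Bool) :
    ∀ (fuel t : Nat), colhas.length ≤ t + fuel → t ≤ colhas.length →
      t ≤ pvPeelLeftGo colhas fuel t ∧ pvPeelLeftGo colhas fuel t ≤ colhas.length ∧
      (∀ i : Nat, t ≤ i → i < pvPeelLeftGo colhas fuel t → colhas.getD i false = false) ∧
      (pvPeelLeftGo colhas fuel t = colhas.length ∨ colhas.getD (pvPeelLeftGo colhas fuel t) false = true) := by
  intro fuel
  induction fuel with
  | zero =>
    intro t hf ht
    simp only [pvPeelLeftGo]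
    have heq : t = colhas.length := by omega
    exact ⟨le_refl t, by omega, fun i h1 h2 => absurd h2 (by omega), Or.inl heq⟩
  | succ fuel ih =>
    intro t hf ht
    rw [pvPeelLeftGo]
    by_cases h : t < colhas.length
    · rw [dif_pos h]
      by_cases hb : colhas[t] = true
      · rw [if_pos hb]
        refine ⟨le_refl t, le_of_lt h, fun i h1 h2 => absurd h2 (by omega), Or.inr ?_⟩
        rw [List.getD_eq_getElem colhas false h]
        exact hb
      · rw [if_neg hb]
        have hrec := ih (t + 1) (by omega) (by omega)
        refine ⟨by omega, hrec.2.1, ?_, hrec.2.2.2⟩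
        intro i hi1 hi2
        rcases Nat.eq_or_lt_of_le hi1 with rfl | hi
        · rw [List.getD_eq_getElem colhas false h]
          exact Bool.eq_false_iff.2 hb
        · exact hrec.2.2.1 i (by omega) hi2
    · rw [dif_neg h]
      have heq : t = colhas.length := by omega
      exact ⟨le_refl t, by omega, fun i h1 h2 => absurd h2 (by omega), Or.inl heq⟩

theorem pvPeelLeft_spec (colhas : List Bool) :
    ∀ (n t : Nat), colhas.length - t = n → t ≤ colhas.length →
      t ≤ pvPeelLeft colhas t ∧ pvPeelLeft colhas t ≤ colhas.length ∧
      (∀ i : Nat, t ≤ i → i < pvPeelLeft colhas t → colhas.getD i false = false) ∧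
      (pvPeelLeft colhas t = colhas.length ∨ colhas.getD (pvPeelLeft colhas t) false = true) := by
  intro n t hn ht
  exact pvPeelLeftGo_spec colhas (colhas.length - t) t (by omega) ht

-- specification of the right-peeling loop
theorem pvPeelRight_spec (colhas : List Bool) :
    ∀ (b : Nat),
      pvPeelRight colhas b ≤ b ∧
      (∀ i : Nat, pvPeelRight colhas b ≤ i → i < b → colhas.getD i false = false) ∧
      (pvPeelRight colhas b = 0 ∨ colhas.getD (pvPeelRight colhas b - 1) false = true) := by
  intro b
  induction b with
  | zero =>
    exact ⟨le_refl 0, fun i h1 h2 => absurd h2 (by omega), Or.inl rfl⟩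
  | succ b ih =>
    rw [pvPeelRight]
    by_cases hbl : colhas.getD b false = true
    · rw [if_pos hbl]
      exact ⟨le_refl _, fun i h1 h2 => absurd h2 (by omega), Or.inr (by simpa using hbl)⟩
    · rw [if_neg hbl]
      refine ⟨by omega, ?_, ih.2.2⟩
      intro i hi1 hi2
      rcases Nat.lt_or_ge i b with hi | hi
      · exact ih.2.1 i hi1 hi
      · have : i = b := by omega
        rw [this]; exact Bool.eq_false_iff.2 hbl

-- a slice with Nat bounds-- a slice with Nat bounds is the map of pyGetD over the index range
theorem pvSliceMap (grid : List (List String)) (a b : Nat) (hab : a ≤ b) (hb : b ≤ grid.length) :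
    PySem.List.slice grid (some (a : Int)) (some (b : Int)) =
      (PySem.List.pyRange (a : Int) (b : Int) 1).map (fun y => PySem.List.pyGetD grid y []) := by
  rw [PySem.List.slice_natCast]
  apply List.ext_getElem
  · simp [PySem.List.length_pyRange_one]
    omega
  · intro k hk1 hk2
    have hk : k < b - a := by
      simp at hk1; omega
    rw [List.getElem_take, List.getElem_drop, List.getElem_map, PySem.List.getElem_pyRange_one]
    rw [PySem.List.pyGetD_eq_getElem grid [] (by omega) (by omega)]
    congr 1

-- there is a non-space cell at column x somewhere in g
def pvCellAt (g : List (List String)) (x : Int) : Prop :=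
  ∃ q ∈ g, ∃ r ∈ PySem.List.enumerate q 0, r.2 ≠ " " ∧ r.1 = x

theorem pvCellAt_iff (g : List (List String)) (x : Int) :
    pvCellAt g x ↔ 0 ≤ x ∧ ∃ q ∈ g, x < (q.length : Int) ∧ PySem.List.pyGetD q x "" ≠ " " := by
  constructor
  · rintro ⟨q, hq, r, hr, hne, hx⟩
    rcases (PySem.List.mem_enumerate_iff q 0 r).1 hr with ⟨k, hk, hrk⟩
    subst hrk
    simp only [zero_add] at hx hne
    subst hx
    refine ⟨Int.natCast_nonneg k, q, hq, by exact_mod_cast hk, ?_⟩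
    rw [PySem.List.pyGetD_natCast, List.getD_eq_getElem q "" hk]
    exact hne
  · rintro ⟨hx, q, hq, hlt, hne⟩
    have hk : x.toNat < q.length := by omega
    refine ⟨q, hq, ((0 : Int) + x.toNat, q[x.toNat]),
      (PySem.List.mem_enumerate_iff q 0 _).2 ⟨x.toNat, hk, rfl⟩, ?_, by omega⟩
    rw [PySem.List.pyGetD_eq_getElem q "" hx hlt] at hne
    exact hne

-- canonical rendering of the trimmed box: rows y0..jl, columns lo..Mc
def pvRender (grid : List (List String)) (coll : Bool) (y0 jl lo Mc : Int) : String :=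
  PySem.Str.join "\n"
    (let L := (PySem.List.pyRange y0 (jl + 1) 1).map (fun y =>
       "     " ++ PySem.Str.join "" ((PySem.List.pyRange lo (Mc + 1) 1).map
         (fun x => PySem.List.pyGetD (PySem.List.pyGetD grid y []) x "")));
     if coll then L ++ ["", "!! - Collision detected, rendering stopped"] else L)

-- getD into a mapped range
theorem pvGetDMapRange {α : Type} (f : Nat → α) (n i : Nat) (d : α) (h : i < n) :
    ((List.range n).map f).getD i d = f i := by
  rw [List.getD_eq_getElem _ d (by simpa using h), List.getElem_map, List.getElem_range]

-- B's port, characterised: given the first/last non-blank rows y0/jl and the extreme content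
-- columns X/Mc, the peeling loops land exactly on the content bounding box
theorem pvAltChar (grid : List (List String)) (coll : Bool) (y0 jl X Mc : Int)
    (hy00 : 0 ≤ y0) (hy0jl : y0 ≤ jl) (hjllen : jl < (grid.length : Int))
    (hX0 : 0 ≤ X) (hXMc : X ≤ Mc)
    (hy0nb : pvBlank (grid.getD y0.toNat []) = false)
    (hbef : ∀ i : Nat, (i : Int) < y0 → pvBlank (grid.getD i []) = true)
    (hjlnb : pvBlank (grid.getD jl.toNat []) = false)
    (haft : ∀ i : Nat, jl < (i : Int) → pvBlank (grid.getD i []) = true)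
    (hlb : ∀ x, pvCellAt grid x → X ≤ x) (hub : ∀ x, pvCellAt grid x → x ≤ Mc)
    (hcX : pvCellAt grid X) (hcMc : pvCellAt grid Mc)
    (hrl : ∀ y : Int, y0 ≤ y → y ≤ jl → Mc < ((PySem.List.pyGetD grid y []).length : Int)) :
    format_grid_output_py_alt grid coll = pvRender grid coll y0 jl X Mc := by
  have hMc0 : 0 ≤ Mc := le_trans hX0 hXMc
  -- the top peel stops at the first non-blank row
  have htopspec := pvPeelTop_spec grid (grid.length - 0) 0 rfl (by omega)
  have htop : pvPeelTop grid 0 = y0.toNat := by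
    obtain ⟨-, hTle, hTblank, hTstop⟩ := htopspec
    have hT1 : pvPeelTop grid 0 ≤ y0.toNat := by
      by_contra hgt
      push_neg at hgt
      have := hTblank y0.toNat (by omega) hgt
      rw [hy0nb] at this
      exact absurd this (by simp)
    have hT2 : y0.toNat ≤ pvPeelTop grid 0 := by
      rcases hTstop with h | h
      · omega
      · by_contra hgt
        push_neg at hgt
        have hb := hbef (pvPeelTop grid 0) (by omega)
        rw [h] at hb
        exact absurd hb (by simp)
    omega
  -- the bottom peel stops just below the last non-blank row
  have hbotspec := pvPeelBottom_spec grid grid.length (le_refl _)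
  have hbot : pvPeelBottom grid grid.length = jl.toNat + 1 := by
    obtain ⟨hBle, hBblank, hBstop⟩ := hbotspec
    have hB1 : jl.toNat + 1 ≤ pvPeelBottom grid grid.length := by
      by_contra hlt
      push_neg at hlt
      have := hBblank jl.toNat (by omega) (by omega)
      rw [hjlnb] at this
      exact absurd this (by simp)
    have hB2 : pvPeelBottom grid grid.length ≤ jl.toNat + 1 := by
      rcases hBstop with h | h
      · omega
      · by_contra hgt
        push_neg at hgt
        have hb := haft (pvPeelBottom grid grid.length - 1) (by omega)
        rw [h] at hb
        exact absurd hb (by simp)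
    omega
  -- the sliced rows are the content row range
  have hrows : PySem.List.slice grid (some ((y0.toNat : Nat) : Int)) (some ((jl.toNat + 1 : Nat) : Int)) =
      (PySem.List.pyRange y0 (jl + 1) 1).map (fun y => PySem.List.pyGetD grid y []) := by
    rw [pvSliceMap grid y0.toNat (jl.toNat + 1) (by omega) (by omega),
      show ((y0.toNat : Nat) : Int) = y0 by omega,
      show (((jl.toNat + 1 : Nat)) : Int) = jl + 1 by omega]
  simp only [format_grid_output_py_alt, htop, hbot]
  rw [if_neg (show ¬ (y0.toNat = grid.length) by omega)]
  rw [hrows]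
  set R := (PySem.List.pyRange y0 (jl + 1) 1).map (fun y => PySem.List.pyGetD grid y []) with hRdef
  -- cells in the sliced rows are exactly the cells of the grid
  have hcellR : ∀ x : Int, pvCellAt R x ↔ pvCellAt grid x := by
    intro x
    constructor
    · rintro ⟨q, hq, r, hr, hne, hx⟩
      rcases List.mem_map.1 hq with ⟨y, hy, rfl⟩
      rcases PySem.List.mem_pyRange_one.1 hy with ⟨hy1, hy2⟩
      have hmem : PySem.List.pyGetD grid y [] ∈ grid := by
        rw [PySem.List.pyGetD_eq_getElem grid [] (by omega) (by omega)]
        exact List.getElem_mem (by omega)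
      exact ⟨_, hmem, r, hr, hne, hx⟩
    · rintro ⟨q, hq, r, hr, hne, hx⟩
      rcases List.mem_iff_getElem.1 hq with ⟨k, hk, rfl⟩
      have hknb : pvBlank (grid.getD k []) = false := by
        rw [List.getD_eq_getElem grid [] hk, pvBlank_eq_false_iff]
        exact ⟨r.2, pvEnumerate_snd_mem _ 0 r hr, hne⟩
      have hk1 : y0 ≤ (k : Int) := by
        by_contra hlt
        push_neg at hlt
        have := hbef k hlt
        rw [hknb] at this
        exact absurd this (by simp)
      have hk2 : (k : Int) ≤ jl := by
        by_contra hlt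
        push_neg at hlt
        have := haft k hlt
        rw [hknb] at this
        exact absurd this (by simp)
      have hmem : grid[k] ∈ R := by
        rw [hRdef]
        refine List.mem_map.2 ⟨(k : Int), PySem.List.mem_pyRange_one.2 ⟨hk1, by omega⟩, ?_⟩
        rw [PySem.List.pyGetD_eq_getElem grid [] (by omega) (by omega)]
        simp
      exact ⟨grid[k], hmem, r, hr, hne, hx⟩
  -- the width is attained and bounds every row
  obtain ⟨m, hm⟩ : ∃ m, PySem.List.max? (R.map List.length) (fun v => v) = some m := by
    cases h : PySem.List.max? (R.map List.length) (fun v => v) with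
    | none =>
      rw [PySem.List.max?_eq_none_iff] at h
      rw [List.map_eq_nil_iff, hRdef, List.map_eq_nil_iff,
        PySem.List.pyRange_one_cons (by omega : y0 < jl + 1)] at h
      exact absurd h (by simp)
    | some m => exact ⟨m, rfl⟩
  have hmmax : ∀ r ∈ R, r.length ≤ m := by
    intro r hr
    exact PySem.List.max?_isMax hm r.length (List.mem_map_of_mem hr)
  rw [hm]
  simp only [Option.getD_some]
  -- the column flag list
  set F := (List.range m).map (fun x =>
      R.any (fun r => decide (x < r.length) && decide (PySem.List.pyGetD r (x : Int) "" ≠ " "))) with hFdef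
  have hFlen : F.length = m := by simp [hFdef]
  have hMcm : Mc.toNat < m := by
    rcases (pvCellAt_iff R Mc).1 ((hcellR Mc).2 hcMc) with ⟨-, q, hq, hlt, -⟩
    have := hmmax q hq
    omega
  have hflag : ∀ x : Nat, (F.getD x false = true ↔ pvCellAt grid (x : Int)) := by
    intro x
    by_cases hx : x < m
    · rw [hFdef, pvGetDMapRange _ _ _ _ hx, ← hcellR]
      constructor
      · intro h
        rcases List.any_eq_true.1 h with ⟨r, hr, hpred⟩
        rw [Bool.and_eq_true, decide_eq_true_iff, decide_eq_true_iff] at hpred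
        exact (pvCellAt_iff R x).2 ⟨Int.natCast_nonneg x, r, hr, by exact_mod_cast hpred.1, hpred.2⟩
      · intro h
        rcases (pvCellAt_iff R x).1 h with ⟨-, q, hq, hlt, hneq⟩
        exact List.any_eq_true.2 ⟨q, hq, by
          rw [Bool.and_eq_true, decide_eq_true_iff, decide_eq_true_iff]
          exact ⟨by exact_mod_cast hlt, hneq⟩⟩
    · constructor
      · intro h
        rw [List.getD_eq_default _ _ (by omega)] at h
        exact absurd h (by simp)
      · intro h
        have := hub _ h
        omega
  -- the left peel stops at the leftmost content column
  have hleftspec := pvPeelLeft_spec F (F.length - 0) 0 rfl (by omega)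
  have hleft : pvPeelLeft F 0 = X.toNat := by
    obtain ⟨-, hLle, hLfalse, hLstop⟩ := hleftspec
    have hXm : X.toNat < m := by omega
    have hXtrue : F.getD X.toNat false = true := by
      rw [hflag X.toNat, Int.toNat_of_nonneg hX0]
      exact hcX
    have h1 : pvPeelLeft F 0 ≤ X.toNat := by
      by_contra hgt
      push_neg at hgt
      have := hLfalse X.toNat (by omega) hgt
      rw [hXtrue] at this
      exact absurd this (by simp)
    rcases hLstop with h | h
    · omega
    · have := hlb _ ((hflag _).1 h)
      omega
  -- the right peel stops just right of the rightmost content column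
  obtain ⟨hRle, hRfalse, hRstop⟩ := pvPeelRight_spec F m
  have hright : pvPeelRight F m = Mc.toNat + 1 := by
    have hMctrue : F.getD Mc.toNat false = true := by
      rw [hflag Mc.toNat, Int.toNat_of_nonneg hMc0]
      exact hcMc
    have h1 : Mc.toNat + 1 ≤ pvPeelRight F m := by
      by_contra hlt
      push_neg at hlt
      have := hRfalse Mc.toNat (by omega) hMcm
      rw [hMctrue] at this
      exact absurd this (by simp)
    rcases hRstop with h | h
    · omega
    · have := hub _ ((hflag _).1 h)
      omega
  rw [hleft, hright]
  -- assemble the lines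
  have hlines : R.map (fun r =>
      "     " ++ PySem.Str.join "" ((PySem.List.pyRange ((X.toNat : Nat) : Int) ((Mc.toNat + 1 : Nat) : Int) 1).map
        (fun x => if x < (r.length : Int) then PySem.List.pyGetD r x " " else " "))) =
      (PySem.List.pyRange y0 (jl + 1) 1).map (fun y =>
        "     " ++ PySem.Str.join "" ((PySem.List.pyRange X (Mc + 1) 1).map
          (fun x => PySem.List.pyGetD (PySem.List.pyGetD grid y []) x ""))) := by
    have hcast1 : ((X.toNat : Nat) : Int) = X := Int.toNat_of_nonneg hX0
    have hcast2 : ((Mc.toNat + 1 : Nat) : Int) = Mc + 1 := by omega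
    rw [hcast1, hcast2, hRdef, List.map_map]
    apply List.map_congr_left
    intro y hy
    rcases PySem.List.mem_pyRange_one.1 hy with ⟨hy1, hy2⟩
    simp only [Function.comp]
    congr 1
    congr 1
    apply List.map_congr_left
    intro x hx
    rcases PySem.List.mem_pyRange_one.1 hx with ⟨hx1, hx2⟩
    have hlen := hrl y hy1 (by omega)
    rw [if_pos (by omega : x < ((PySem.List.pyGetD grid y []).length : Int))]
    rw [PySem.List.pyGetD_eq_getElem _ " " (by omega) (by omega),
      PySem.List.pyGetD_eq_getElem _ "" (by omega) (by omega)]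
  rw [hlines]
  simp only [pvRender]

-- on a non-empty grid A's initial min_col is the first row's length
theorem pvC0_headD (grid : List (List String)) (h : grid ≠ []) :
    pvC0 grid = ((grid.headD []).length : Int) := by
  cases grid with
  | nil => exact absurd rfl h
  | cons r t => rfl

-- shared context: in the content case both ports render the trimmed box, A's left bound being
-- clamped by min with len(grid[0])
theorem pvCtx (grid : List (List String)) (coll : Bool)
    (hpre : Pre_format_grid_output_py grid coll)
    (y0 : Int) (rest : List Int)
    (hcr : pvMarks (fun row => ∃ c ∈ row, c ≠ " ") 0 grid = y0 :: rest) :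
    ∃ jl X Mc : Int,
      0 ≤ y0 ∧ y0 ≤ jl ∧ jl < (grid.length : Int) ∧ 0 ≤ X ∧ X ≤ Mc ∧
      (∀ x, pvCellAt grid x → X ≤ x ∧ x ≤ Mc) ∧
      pvCellAt grid X ∧
      (∀ y : Int, y0 ≤ y → y ≤ jl → Mc < ((PySem.List.pyGetD grid y []).length : Int)) ∧
      format_grid_output_py grid coll =
        pvRender grid coll y0 jl (min ((grid.headD []).length : Int) X) Mc ∧
      format_grid_output_py_alt grid coll = pvRender grid coll y0 jl X Mc := by
  have hy0mem : y0 ∈ pvMarks (fun row => ∃ c ∈ row, c ≠ " ") 0 grid := by rw [hcr]; simp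
  have hy0b := pvMarks_le _ grid 0 y0 hy0mem
  have hjl? : (y0 :: rest).getLast? = some ((y0 :: rest).getLast (by simp)) :=
    List.getLast?_eq_some_getLast _
  set jl : Int := (y0 :: rest).getLast (by simp) with hjldef
  have hjlmem : jl ∈ pvMarks (fun row => ∃ c ∈ row, c ≠ " ") 0 grid := by
    rw [hcr]; exact List.getLast_mem _
  have hjlb := pvMarks_le _ grid 0 jl hjlmem
  have hy0jl : y0 ≤ jl :=
    pvMarks_head_min _ grid 0 y0 (by rw [hcr]; rfl) jl hjlmem
  have hmemge : ∀ m ∈ pvMarks (fun row => ∃ c ∈ row, c ≠ " ") 0 grid, y0 ≤ m :=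
    pvMarks_head_min _ grid 0 y0 (by rw [hcr]; rfl)
  have hmemle : ∀ m ∈ pvMarks (fun row => ∃ c ∈ row, c ≠ " ") 0 grid, m ≤ jl := by
    intro m hm
    have h1 := (PySem.List.le_foldl_max (pvMarks (fun row => ∃ c ∈ row, c ≠ " ") 0 grid) (-1)).2 m hm
    rw [pvMarks_foldl_max, hcr, hjl?] at h1
    simp only at h1
    rw [max_eq_right (by omega : (-1 : Int) ≤ jl)] at h1
    omega
  -- marks membership ↔ the row is short of blank
  have hmark_iff : ∀ i : Nat, ((i : Int) ∈ pvMarks (fun row => ∃ c ∈ row, c ≠ " ") 0 grid ↔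
      i < grid.length ∧ pvBlank (grid.getD i []) = false) := by
    intro i
    constructor
    · intro hm
      rcases (pvMarks_mem_iff _ grid 0 _).1 hm with ⟨p, hp, hP, hpi⟩
      rcases (PySem.List.mem_enumerate_iff grid 0 p).1 hp with ⟨k, hk, rfl⟩
      simp only [zero_add] at hpi hP
      have hki : k = i := by exact_mod_cast hpi
      subst hki
      refine ⟨hk, ?_⟩
      rw [List.getD_eq_getElem grid [] hk, pvBlank_eq_false_iff]
      exact hP
    · rintro ⟨hk, hb⟩
      rw [List.getD_eq_getElem grid [] hk, pvBlank_eq_false_iff] at hb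
      exact (pvMarks_mem_iff _ grid 0 _).2 ⟨((0 : Int) + i, grid[i]),
        (PySem.List.mem_enumerate_iff grid 0 _).2 ⟨i, hk, rfl⟩, hb, by omega⟩
  have hcontent : ∃ row ∈ grid, ∃ c ∈ row, c ≠ " " := by
    rcases (pvMarks_mem_iff _ grid 0 y0).1 hy0mem with ⟨p, hp, hf, -⟩
    exact ⟨p.2, pvEnumerate_snd_mem grid 0 p hp, hf⟩
  obtain ⟨f1, frest, hfirsts⟩ : ∃ f1 frest, pvFirsts grid = f1 :: frest := by
    cases hf : pvFirsts grid with
    | nil =>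
      rcases hcontent with ⟨row, hrow, c, hc, hne⟩
      exact absurd hne ((pvFirsts_eq_nil_iff grid).1 hf row hrow c hc)
    | cons a b => exact ⟨a, b, rfl⟩
  obtain ⟨l1, lrest, hlasts⟩ : ∃ l1 lrest, pvLasts grid = l1 :: lrest := by
    cases hf : pvLasts grid with
    | nil =>
      rcases hcontent with ⟨row, hrow, c, hc, hne⟩
      exact absurd hne ((pvLasts_eq_nil_iff grid).1 hf row hrow c hc)
    | cons a b => exact ⟨a, b, rfl⟩
  set X : Int := frest.foldl min f1 with hXdef
  set Mc : Int := lrest.foldl max l1 with hMcdef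
  have hXle : ∀ e ∈ f1 :: frest, X ≤ e := by
    intro e he
    rcases List.mem_cons.1 he with rfl | he
    · exact (pvFoldlMinLe frest e).1
    · exact (pvFoldlMinLe frest f1).2 e he
  have hMcGe : ∀ e ∈ l1 :: lrest, e ≤ Mc := by
    intro e he
    rcases List.mem_cons.1 he with rfl | he
    · exact (PySem.List.le_foldl_max lrest e).1
    · exact (PySem.List.le_foldl_max lrest l1).2 e he
  -- column bounds from the per-row first/last indices
  have hcell_lb : ∀ x, pvCellAt grid x → X ≤ x := by
    rintro x ⟨q, hq, r, hr, hne, hx⟩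
    have hxm : x ∈ pvMarks (fun c => c ≠ " ") 0 q :=
      (pvMarks_mem_iff _ q 0 x).2 ⟨r, hr, hne, hx⟩
    obtain ⟨z, zs, hqm⟩ : ∃ z zs, pvMarks (fun c => c ≠ " ") 0 q = z :: zs := by
      cases hm : pvMarks (fun c => c ≠ " ") 0 q with
      | nil => rw [hm] at hxm; simp at hxm
      | cons z zs => exact ⟨z, zs, rfl⟩
    have hzx : z ≤ x := pvMarks_head_min _ q 0 z (by rw [hqm]; rfl) x hxm
    have hzF : z ∈ pvFirsts grid := List.mem_filterMap.2 ⟨q, hq, by rw [hqm]; rfl⟩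
    have := hXle z (hfirsts ▸ hzF)
    omega
  have hcell_ub : ∀ x, pvCellAt grid x → x ≤ Mc := by
    rintro x ⟨q, hq, r, hr, hne, hx⟩
    have hxm : x ∈ pvMarks (fun c => c ≠ " ") 0 q :=
      (pvMarks_mem_iff _ q 0 x).2 ⟨r, hr, hne, hx⟩
    obtain ⟨lv, hlv⟩ : ∃ lv, (pvMarks (fun c => c ≠ " ") 0 q).getLast? = some lv :=
      ⟨_, List.getLast?_eq_some_getLast (List.ne_nil_of_mem hxm)⟩
    have hlv0 := pvMarks_le _ q 0 lv (List.mem_of_getLast? hlv)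
    have h1 := (PySem.List.le_foldl_max (pvMarks (fun c => c ≠ " ") 0 q) (-1)).2 x hxm
    rw [pvMarks_foldl_max, hlv] at h1
    simp only at h1
    rw [max_eq_right (by omega : (-1 : Int) ≤ lv)] at h1
    have hlvL : lv ∈ pvLasts grid := List.mem_filterMap.2 ⟨q, hq, hlv⟩
    have := hMcGe _ (hlasts ▸ hlvL)
    omega
  have hcellX : pvCellAt grid X := by
    have hXF : X ∈ pvFirsts grid := hfirsts ▸ pvFoldlMinMem frest f1
    rcases List.mem_filterMap.1 hXF with ⟨q, hq, hhead⟩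
    rcases (pvMarks_mem_iff _ q 0 X).1 (List.mem_of_mem_head? hhead) with ⟨r, hr, hne, hx⟩
    exact ⟨q, hq, r, hr, hne, hx⟩
  have hcellMc : pvCellAt grid Mc := by
    have hMcL : Mc ∈ pvLasts grid := hlasts ▸ pvFoldlMaxMem lrest l1
    rcases List.mem_filterMap.1 hMcL with ⟨q, hq, hlast⟩
    rcases (pvMarks_mem_iff _ q 0 Mc).1 (List.mem_of_getLast? hlast) with ⟨r, hr, hne, hx⟩
    exact ⟨q, hq, r, hr, hne, hx⟩
  have hX0 : 0 ≤ X := ((pvCellAt_iff grid X).1 hcellX).1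
  have hXMc : X ≤ Mc := hcell_ub X hcellX
  have hMc0 : 0 ≤ Mc := le_trans hX0 hXMc
  -- rows inside the content range are longer than Mc (from Pre_)
  have hRowLong : ∀ y : Int, y0 ≤ y → y ≤ jl →
      Mc < ((PySem.List.pyGetD grid y []).length : Int) := by
    intro y hy1 hy2
    have hynn : 0 ≤ y := by omega
    have hylt : y < (grid.length : Int) := by omega
    have hytn : y.toNat < grid.length := by omega
    have hget : PySem.List.pyGetD grid y [] = grid[y.toNat] :=
      PySem.List.pyGetD_eq_getElem grid [] hynn hylt
    have hpy : ((0 : Int) + y.toNat, grid[y.toNat]) ∈ PySem.List.enumerate grid 0 :=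
      (PySem.List.mem_enumerate_iff grid 0 _).2 ⟨y.toNat, hytn, rfl⟩
    rcases (pvMarks_mem_iff _ grid 0 y0).1 hy0mem with ⟨p0, hp0, hp0pred, hp0fst⟩
    rcases (pvMarks_mem_iff _ grid 0 jl).1 hjlmem with ⟨pl, hpl, hplpred, hplfst⟩
    have hp0any : p0.2.any (fun c => c ≠ " ") := by
      rw [List.any_eq_true]
      rcases hp0pred with ⟨c, hc, hne⟩
      exact ⟨c, hc, by simpa using hne⟩
    have hplany : pl.2.any (fun c => c ≠ " ") := by
      rw [List.any_eq_true]
      rcases hplpred with ⟨c, hc, hne⟩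
      exact ⟨c, hc, by simpa using hne⟩
    rcases hcellMc with ⟨qM, hqM, rM, hrM, hrMne, hrMeq⟩
    rcases pvEnumerate_mem_of_mem grid qM hqM with ⟨pM, hpM, hpMeq⟩
    have hcall := hpre _ hpy
      ⟨⟨p0, hp0, by rw [hp0fst]; simp; omega, hp0any⟩,
       ⟨pl, hpl, by rw [hplfst]; simp; omega, hplany⟩⟩
      pM hpM rM (by rw [hpMeq]; exact hrM) hrMne
    rw [hget]
    simp only at hcall
    omega
  -- A's characterisation via the sweep
  have hAchar : format_grid_output_py grid coll =
      pvRender grid coll y0 jl (min ((grid.headD []).length : Int) X) Mc := by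
    have hgne : grid ≠ [] := by
      intro h
      rw [h, pvMarks_nil] at hcr
      exact absurd hcr (by simp)
    simp only [format_grid_output_py, pvSweep, hcr, hfirsts, hlasts, pvC0_headD grid hgne]
    have hmr : List.foldl min ((grid.length : Nat) : Int) (y0 :: rest) = y0 := by
      rw [← hcr, pvMarks_foldl_min, hcr]
      simp only [List.head?_cons]
      exact min_eq_right (by omega)
    have hMr : List.foldl max (-1 : Int) (y0 :: rest) = jl := by
      rw [← hcr, pvMarks_foldl_max, hcr, hjl?]
      simp only
      exact max_eq_right (by omega)
    have hl1mem : l1 ∈ pvLasts grid := by rw [hlasts]; simp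
    have hl1pos : 0 ≤ l1 := by
      rcases List.mem_filterMap.1 hl1mem with ⟨q, hq, hlast⟩
      have := pvMarks_le _ q 0 l1 (List.mem_of_getLast? hlast)
      omega
    have hmc : (f1 :: frest).foldl min ((grid.headD []).length : Int) =
        min ((grid.headD []).length : Int) X := by
      rw [List.foldl_cons, pvFoldlMinOut]
    have hMc2 : (l1 :: lrest).foldl max (-1 : Int) = Mc := by
      rw [List.foldl_cons, pvFoldlMaxOut, max_eq_right]
      have := (PySem.List.le_foldl_max lrest l1).1
      omega
    simp only [hmr, hMr, hmc, hMc2]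
    rw [if_neg (by omega : ¬ (y0 > jl))]
    simp only [pvJoinFold, String.empty_append, pvRender]
  -- B's characterisation via the peeling loops
  have hBchar : format_grid_output_py_alt grid coll = pvRender grid coll y0 jl X Mc := by
    refine pvAltChar grid coll y0 jl X Mc (by omega) hy0jl (by omega) hX0 hXMc
      ?_ ?_ ?_ ?_ hcell_lb hcell_ub hcellX hcellMc hRowLong
    · exact ((hmark_iff y0.toNat).1 (by rw [Int.toNat_of_nonneg (by omega : (0:Int) ≤ y0)]; exact hy0mem)).2
    · intro i hi
      by_cases hik : i < grid.length
      · by_contra hb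
        have hb' : pvBlank (grid.getD i []) = false := by
          cases h : pvBlank (grid.getD i []) with
          | false => rfl
          | true => exact absurd h hb
        have := hmemge _ ((hmark_iff i).2 ⟨hik, hb'⟩)
        omega
      · rw [List.getD_eq_default _ _ (by omega)]
        rfl
    · exact ((hmark_iff jl.toNat).1 (by rw [Int.toNat_of_nonneg (by omega : (0:Int) ≤ jl)]; exact hjlmem)).2
    · intro i hi
      by_cases hik : i < grid.length
      · by_contra hb
        have hb' : pvBlank (grid.getD i []) = false := by
          cases h : pvBlank (grid.getD i []) with
          | false => rfl
          | true => exact absurd h hb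
        have := hmemle _ ((hmark_iff i).2 ⟨hik, hb'⟩)
        omega
      · rw [List.getD_eq_default _ _ (by omega)]
        rfl
  exact ⟨jl, X, Mc, by omega, hy0jl, by omega, hX0, hXMc,
    fun x hx => ⟨hcell_lb x hx, hcell_ub x hx⟩, hcellX, hRowLong, hAchar, hBchar⟩

-- with no content both ports return "Empty map"
theorem pvEmpty (grid : List (List String)) (coll : Bool)
    (h : pvMarks (fun row => ∃ c ∈ row, c ≠ " ") 0 grid = []) :
    format_grid_output_py grid coll = "Empty map" ∧
    format_grid_output_py_alt grid coll = "Empty map" := by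
  have hallb : ∀ row ∈ grid, ∀ c ∈ row, ¬ c ≠ " " := (pvCR_eq_nil_iff grid).1 h
  constructor
  · simp only [format_grid_output_py, pvSweep, h, List.foldl_nil]
    rw [if_pos (by omega : ((grid.length : Nat) : Int) > -1)]
  · obtain ⟨-, hTle, -, hTstop⟩ := pvPeelTop_spec grid (grid.length - 0) 0 rfl (by omega)
    have htop : pvPeelTop grid 0 = grid.length := by
      rcases hTstop with h' | h'
      · exact h'
      · exfalso
        by_cases hl : pvPeelTop grid 0 < grid.length
        · rw [List.getD_eq_getElem grid [] hl, pvBlank_eq_false_iff] at h'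
          rcases h' with ⟨c, hc, hne⟩
          exact hallb _ (List.getElem_mem hl) c hc hne
        · have heq : pvPeelTop grid 0 = grid.length := by omega
          rw [heq, List.getD_eq_default _ _ (le_refl _)] at h'
          exact absurd h' (by simp [pvBlank_nil])
    simp only [format_grid_output_py_alt, htop]
    simp

-- outside D_ the two ports agree
theorem pvMain (grid : List (List String)) (coll : Bool)
    (hpre : Pre_format_grid_output_py grid coll)
    (hnd : ¬ D_format_grid_output_py grid coll) :
    format_grid_output_py grid coll = format_grid_output_py_alt grid coll := by
  cases hcr : pvMarks (fun row => ∃ c ∈ row, c ≠ " ") 0 grid with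
  | nil => rw [(pvEmpty grid coll hcr).1, (pvEmpty grid coll hcr).2]
  | cons y0 rest =>
    obtain ⟨jl, X, Mc, hy00, hy0jl, hjllen, hX0, hXMc, hbounds, hcellX, hrl, hA, hB⟩ :=
      pvCtx grid coll hpre y0 rest hcr
    rw [hA, hB]
    suffices hmin : min ((grid.headD []).length : Int) X = X by rw [hmin]
    have hgne : grid ≠ [] := by
      intro h
      rw [h, pvMarks_nil] at hcr
      exact absurd hcr (by simp)
    have hcontent : ∃ row ∈ grid, ∃ c ∈ row, c ≠ " " := by
      rcases hcellX with ⟨q, hq, r, hr, hne, -⟩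
      exact ⟨q, hq, r.2, pvEnumerate_snd_mem _ 0 r hr, hne⟩
    rw [pvD_iff] at hnd
    push_neg at hnd
    rcases hnd hgne hcontent with ⟨q, hq, r, hr, hne, hle⟩
    have hcell : pvCellAt grid r.1 := ⟨q, hq, r, hr, hne, rfl⟩
    have := (hbounds r.1 hcell).1
    exact min_eq_right (by omega)

-- inside D_ (and Pre_) the two ports differ
set_option maxHeartbeats 1000000 in
theorem pvTight (grid : List (List String)) (coll : Bool)
    (hpre : Pre_format_grid_output_py grid coll)
    (hd : D_format_grid_output_py grid coll) :
    format_grid_output_py grid coll ≠ format_grid_output_py_alt grid coll := by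
  obtain ⟨hgne, hcontent, hcols⟩ := (pvD_iff grid coll).1 hd
  obtain ⟨y0, rest, hcr⟩ : ∃ y0 rest,
      pvMarks (fun row => ∃ c ∈ row, c ≠ " ") 0 grid = y0 :: rest := by
    cases h : pvMarks (fun row => ∃ c ∈ row, c ≠ " ") 0 grid with
    | nil =>
      rcases hcontent with ⟨row, hrow, c, hc, hne⟩
      exact absurd hne ((pvCR_eq_nil_iff grid).1 h row hrow c hc)
    | cons a b => exact ⟨a, b, rfl⟩
  obtain ⟨jl, X, Mc, hy00, hy0jl, hjllen, hX0, hXMc, hbounds, hcellX, hrl, hA, hB⟩ :=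
    pvCtx grid coll hpre y0 rest hcr
  set c0 : Int := ((grid.headD []).length : Int) with hc0
  have hc0nn : 0 ≤ c0 := Int.natCast_nonneg _
  -- under D_ every cell lies strictly right of c0, so A's left bound is c0 < X
  have hcellgt : ∀ x, pvCellAt grid x → c0 < x := by
    rintro x ⟨q, hq, r, hr, hne, hx⟩
    rw [hc0]
    rw [← hx]
    exact hcols q hq r hr hne
  have hc0X : c0 < X := hcellgt X hcellX
  have hmin : min c0 X = c0 := min_eq_left (by omega)
  rw [hA, hB, hmin]
  -- columns in [c0, X) hold single spaces on every content-range row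
  have hSpace : ∀ y : Int, y0 ≤ y → y ≤ jl → ∀ x ∈ PySem.List.pyRange c0 X 1,
      PySem.List.pyGetD (PySem.List.pyGetD grid y []) x "" = " " := by
    intro y hy1 hy2 x hx
    rcases PySem.List.mem_pyRange_one.1 hx with ⟨hx1, hx2⟩
    have hlen := hrl y hy1 hy2
    have hxlt : x < ((PySem.List.pyGetD grid y []).length : Int) := by omega
    have hxnn : 0 ≤ x := by omega
    by_contra hne
    have hmem : PySem.List.pyGetD grid y [] ∈ grid := by
      rw [PySem.List.pyGetD_eq_getElem grid [] (by omega) (by omega)]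
      exact List.getElem_mem (by omega)
    have hcell : pvCellAt grid x :=
      (pvCellAt_iff grid x).2 ⟨hxnn, PySem.List.pyGetD grid y [], hmem, hxlt, hne⟩
    have := (hbounds x hcell).1
    omega
  -- the two renders differ in length
  simp only [pvRender]
  intro heq
  have hlen := congrArg (fun s => s.toList.length) heq
  simp only at hlen
  set plen : Nat := (PySem.List.pyRange c0 X 1).length with hplendef
  have hplen : 1 ≤ plen := by
    rw [hplendef, PySem.List.length_pyRange_one]
    omega
  set yr : List Int := PySem.List.pyRange y0 (jl + 1) 1 with hyrdef
  have hyrlen : 1 ≤ yr.length := by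
    rw [hyrdef, PySem.List.length_pyRange_one]
    omega
  set fA : Int → String := fun y =>
    "     " ++ PySem.Str.join ""
      ((PySem.List.pyRange c0 (Mc + 1) 1).map
        (fun x => PySem.List.pyGetD (PySem.List.pyGetD grid y []) x "")) with hfA
  set fB : Int → String := fun y =>
    "     " ++ PySem.Str.join ""
      ((PySem.List.pyRange X (Mc + 1) 1).map
        (fun x => PySem.List.pyGetD (PySem.List.pyGetD grid y []) x "")) with hfB
  have hshift : ∀ y ∈ yr, (fA y).toList.length = (fB y).toList.length + plen := by
    intro y hy
    rcases PySem.List.mem_pyRange_one.1 (by rw [hyrdef] at hy; exact hy) with ⟨hy1, hy2⟩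
    rw [hfA, hfB]
    simp only [String.toList_append, List.length_append, pvStrJoinEmptyLen, List.map_map]
    rw [PySem.List.pyRange_one_append c0 X (Mc + 1) (by omega) (by omega),
      List.map_append, List.sum_append]
    have hpref : ((PySem.List.pyRange c0 X 1).map
        ((fun s => s.toList.length) ∘ (fun x => PySem.List.pyGetD (PySem.List.pyGetD grid y []) x ""))).sum = plen := by
      rw [hplendef]
      apply pvSumConstOne
      intro x hx
      simp only [Function.comp]
      rw [hSpace y hy1 (by omega) x hx]
      rfl
    rw [hpref]
    ring
  have hsums := pvSumShift yr (fun y => (fA y).toList.length)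
    (fun y => (fB y).toList.length) plen hshift
  have hmul : 1 * plen ≤ yr.length * plen := Nat.mul_le_mul_right plen hyrlen
  have hAne : yr.map fA ≠ [] := by
    intro h
    have h2 := congrArg List.length h
    rw [List.length_map] at h2
    simp only [List.length_nil] at h2
    omega
  have hBne : yr.map fB ≠ [] := by
    intro h
    have h2 := congrArg List.length h
    rw [List.length_map] at h2
    simp only [List.length_nil] at h2
    omega
  cases coll with
  | false =>
    simp only [Bool.false_eq_true, if_false] at hlen
    rw [pvStrJoinNLLen _ hAne, pvStrJoinNLLen _ hBne, List.map_map, List.map_map] at hlen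
    simp only [Function.comp_def, List.length_map] at hlen
    omega
  | true =>
    simp only [if_true] at hlen
    rw [pvStrJoinNLLen _ (by simp [hAne]), pvStrJoinNLLen _ (by simp [hBne]),
      List.map_append, List.map_append, List.sum_append, List.sum_append,
      List.map_map, List.map_map] at hlen
    simp only [Function.comp_def, List.length_append, List.length_map] at hlen
    omega

-- ===== VERDICT (by name: the statement is the Claim_ definition above) =====
theorem format_grid_output_py_spec : Claim_unchanged_format_grid_output_py := by
  intro grid coll _ hpre hnd
  exact pvMain grid coll hpre hnd

theorem format_grid_output_py_changed : Claim_changed_format_grid_output_py := by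
  unfold Claim_changed_format_grid_output_py; decide

theorem format_grid_output_py_tight : Claim_exact_format_grid_output_py := by
  intro grid coll _ hpre hd
  exact pvTight grid coll hpre hd
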